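-- pv_equiv track=rewrite | github.com/ipanagiotopoulos/cryptography_engineering1 | ex_4.py | string_converter
-- ===== SOURCE A (Python) =====
-- def string_converter(string):
--     text_to_convert = [ char for char in  string]
--     converted_string = []
--     for char_index in range(0,len(string), 1):
--         if ord(text_to_convert[char_index]) >=97 and ord(text_to_convert[char_index]) <= 97+25:
--          converted_string.append(chr(ord(text_to_convert[char_index])-32))
--         elif ord(text_to_convert[char_index]) >=65 and ord(text_to_convert[char_index]) <= 65+25:
--             converted_string.append(text_to_convert[char_index])
--     return "".join(converted_string)
-- ===== SOURCE B (Python) =====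
-- import re
--
-- def string_converter(string):
--     return re.sub(r'[^A-Za-z]', '', string).upper()
-- ===== Notes on version B (the rewrite author's own statement) =====
-- stated objective: idiomatic
-- what changed: Replaced the index-driven loop with ord tests and manual list appends by a two-pass pipeline: a regex substitution drops every non-ASCII-letter character, then str.upper() uppercases the remainder.
import Mathlib
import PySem

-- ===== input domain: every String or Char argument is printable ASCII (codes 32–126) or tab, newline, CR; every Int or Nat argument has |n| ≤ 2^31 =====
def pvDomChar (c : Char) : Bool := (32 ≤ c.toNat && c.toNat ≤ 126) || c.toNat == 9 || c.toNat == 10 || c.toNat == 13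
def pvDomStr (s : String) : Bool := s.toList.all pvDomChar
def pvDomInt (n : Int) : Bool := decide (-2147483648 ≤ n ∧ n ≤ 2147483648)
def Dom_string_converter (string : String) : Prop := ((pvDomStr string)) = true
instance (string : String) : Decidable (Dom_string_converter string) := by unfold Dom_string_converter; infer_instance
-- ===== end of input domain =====

-- B replaces the index loop with a filter-then-uppercase pipeline (idiomatic two-pass form; same cost).

-- ===== PORT A =====
-- index loop over range(0, len(string), 1): append the uppercased char for a-z, the char itself for A-Z
def string_converter (string : String) : String :=
  let text_to_convert := string.toList
  let converted_string :=
    (PySem.List.pyRange 0 (PySem.Str.len string) 1).foldl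
      (fun acc char_index =>
        let c := PySem.List.pyGetD text_to_convert char_index ' '  -- index always in range here
        if 97 ≤ c.toNat ∧ c.toNat ≤ 97 + 25 then acc ++ [Char.ofNat (c.toNat - 32)]
        else if 65 ≤ c.toNat ∧ c.toNat ≤ 65 + 25 then acc ++ [c]
        else acc)
      []
  String.ofList converted_string

-- ===== PORT B =====
-- re.sub(r'[^A-Za-z]', '', string): keep exactly the ASCII letters; then .upper()
def string_converter_alt (string : String) : String :=
  PySem.Str.upper (String.ofList (string.toList.filter
    (fun c => (65 ≤ c.toNat && c.toNat ≤ 90) || (97 ≤ c.toNat && c.toNat ≤ 122))))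

-- ===== PRECONDITION & SPEC =====
def Spec_string_converter (string : String) (out : String) : Prop := out = string_converter_alt string
instance (string : String) (out : String) : Decidable (Spec_string_converter string out) := by unfold Spec_string_converter; infer_instance

-- ===== CLAIM (what is proved, stated in full; the proofs are below) =====
def Claim_equal_string_converter : Prop := ∀ (string : String), Dom_string_converter string → Spec_string_converter string (string_converter string)

-- ===== LEMMAS AND PROOFS =====

lemma islower_iff_toNat (c : Char) :
    PySem.Chars.islower c = true ↔ 97 ≤ c.toNat ∧ c.toNat ≤ 122 := by
  unfold PySem.Chars.islower
  rw [Bool.and_eq_true, decide_eq_true_eq, decide_eq_true_eq, Char.le_def, Char.le_def,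
    UInt32.le_iff_toNat_le, UInt32.le_iff_toNat_le]
  simp only [Char.reduceVal, UInt32.reduceToNat]
  exact Iff.rfl

lemma string_converter_loop (cs : List Char) (acc : List Char) :
    cs.foldl
      (fun acc c =>
        if 97 ≤ c.toNat ∧ c.toNat ≤ 97 + 25 then acc ++ [Char.ofNat (c.toNat - 32)]
        else if 65 ≤ c.toNat ∧ c.toNat ≤ 65 + 25 then acc ++ [c]
        else acc)
      acc
    = acc ++ (cs.filter
        (fun c => (65 ≤ c.toNat && c.toNat ≤ 90) || (97 ≤ c.toNat && c.toNat ≤ 122))).map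
        PySem.Chars.upperChar := by
  induction cs generalizing acc with
  | nil => simp
  | cons c cs ih =>
    simp only [List.foldl_cons, List.filter_cons, ih]
    by_cases hl : 97 ≤ c.toNat ∧ c.toNat ≤ 97 + 25
    · have hfilter : ((65 ≤ c.toNat && c.toNat ≤ 90) || (97 ≤ c.toNat && c.toNat ≤ 122)) = true := by
        simp; omega
      have hupper : PySem.Chars.upperChar c = Char.ofNat (c.toNat - 32) := by
        unfold PySem.Chars.upperChar
        rw [if_pos ((islower_iff_toNat c).mpr (by omega))]
      simp [hl, hfilter, hupper]
    · by_cases hu : 65 ≤ c.toNat ∧ c.toNat ≤ 65 + 25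
      · have hfilter : ((65 ≤ c.toNat && c.toNat ≤ 90) || (97 ≤ c.toNat && c.toNat ≤ 122)) = true := by
          simp; omega
        have hupper : PySem.Chars.upperChar c = c := by
          unfold PySem.Chars.upperChar
          rw [if_neg (by rw [islower_iff_toNat]; omega)]
        simp [hl, hu, hfilter, hupper]
      · have hfilter : ((65 ≤ c.toNat && c.toNat ≤ 90) || (97 ≤ c.toNat && c.toNat ≤ 122)) = false := by
          simp; omega
        simp [hl, hu, hfilter]

-- ===== VERDICT (by name: the statement is the Claim_ definition above) =====
theorem string_converter_spec : Claim_equal_string_converter := by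
  intro s _
  unfold Spec_string_converter string_converter string_converter_alt
  simp only [PySem.Str.len]
  rw [show (PySem.List.pyRange 0 (s.toList.length : Int) 1).foldl
        (fun acc char_index =>
          let c := PySem.List.pyGetD s.toList char_index ' '
          if 97 ≤ c.toNat ∧ c.toNat ≤ 97 + 25 then acc ++ [Char.ofNat (c.toNat - 32)]
          else if 65 ≤ c.toNat ∧ c.toNat ≤ 65 + 25 then acc ++ [c]
          else acc) []
      = s.toList.foldl
        (fun acc c =>
          if 97 ≤ c.toNat ∧ c.toNat ≤ 97 + 25 then acc ++ [Char.ofNat (c.toNat - 32)]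
          else if 65 ≤ c.toNat ∧ c.toNat ≤ 65 + 25 then acc ++ [c]
          else acc) []
      from PySem.List.foldl_pyRange_zero_pyGetD' s.toList ' '
        (fun acc c =>
          if 97 ≤ c.toNat ∧ c.toNat ≤ 97 + 25 then acc ++ [Char.ofNat (c.toNat - 32)]
          else if 65 ≤ c.toNat ∧ c.toNat ≤ 65 + 25 then acc ++ [c]
          else acc) []]
  rw [string_converter_loop]
  simp [PySem.Str.upper, PySem.Chars.upper]
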